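-- pv_equiv track=rewrite | github.com/ajaypy/web | string_processing/slowest_key.py | get_slowest_key
-- ===== SOURCE A (Python) =====
-- def get_slowest_key(K):
--     slowest_key = K[0][0]
--     slowest_time = K[0][1]
--
--     print (slowest_key, " ; ", slowest_time)
--     for i in range(1, len(K)):
--          if K[i][1] - K[i-1][1] > slowest_time:
--              slowest_key = K[i][0]
--              slowest_time = K[i][1] - K[i-1][1]
--
--
--     return slowest_key
-- ===== SOURCE B (Python) =====
-- def get_slowest_key(K):
--     print(K[0][0], " ; ", K[0][1])
--     durations = [K[0][1]] + [K[i][1] - K[i - 1][1] for i in range(1, len(K))]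
--     idx = max(range(len(K)), key=lambda i: durations[i])
--     return K[idx][0]
-- ===== Notes on version B (the rewrite author's own statement) =====
-- stated objective: alternative
-- what changed: Replaces the running best-key/best-time accumulator loop with a materialized durations table followed by an argmax (max over range with key), returning K[idx][0]; Python max's first-maximum rule replicates the strict-'>' keep-earliest tie behaviour; the same print is kept, so K[0] still raises IndexError on empty K.
import Mathlib
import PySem

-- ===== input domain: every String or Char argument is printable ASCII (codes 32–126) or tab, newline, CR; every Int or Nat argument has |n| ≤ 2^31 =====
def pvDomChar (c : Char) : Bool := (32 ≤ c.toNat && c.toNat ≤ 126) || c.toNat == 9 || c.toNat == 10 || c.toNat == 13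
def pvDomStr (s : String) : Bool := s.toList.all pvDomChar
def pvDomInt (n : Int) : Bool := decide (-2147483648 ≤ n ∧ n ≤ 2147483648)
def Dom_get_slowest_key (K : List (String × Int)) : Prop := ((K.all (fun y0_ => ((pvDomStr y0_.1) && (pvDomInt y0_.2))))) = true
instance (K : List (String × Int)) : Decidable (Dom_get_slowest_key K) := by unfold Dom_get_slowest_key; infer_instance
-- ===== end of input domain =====

-- B replaces A's running best-key/best-time accumulator loop with a durations table plus a
-- first-argmax over indices (alternative decomposition, same cost); equivalence is about the
-- RETURN value only — both Pythons perform the identical print of K[0] before computing.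

-- ===== PORT A =====
-- running-accumulator loop over indices 1..len(K)-1, strict '>' keeps the earliest maximum
def get_slowest_key (K : List (String × Int)) : String :=
  let hd := PySem.List.pyGetD K 0 ("", 0)     -- K[0]; Python raises IndexError on [] (outside Pre_)
  let res := (PySem.List.pyRange 1 (K.length : Int)).foldl
    (fun (st : String × Int) i =>
      let ki := PySem.List.pyGetD K i ("", 0)
      let kim := PySem.List.pyGetD K (i - 1) ("", 0)
      if ki.2 - kim.2 > st.2 then (ki.1, ki.2 - kim.2) else st)
    (hd.1, hd.2)
  res.1

-- ===== PORT B =====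
-- durations table, then idx = max(range(len(K)), key=durations.__getitem__), return K[idx][0]
def get_slowest_key_alt (K : List (String × Int)) : String :=
  let durations : List Int :=
    (PySem.List.pyGetD K 0 ("", 0)).2 ::
      (PySem.List.pyRange 1 (K.length : Int)).map
        (fun i => (PySem.List.pyGetD K i ("", 0)).2 - (PySem.List.pyGetD K (i - 1) ("", 0)).2)
  match PySem.List.max? (PySem.List.pyRange 0 (K.length : Int))
      (fun i => PySem.List.pyGetD durations i 0) with
  | some idx => (PySem.List.pyGetD K idx ("", 0)).1
  | none => ""                                 -- only for K = [], outside Pre_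

-- ===== PRECONDITION & SPEC =====
-- A evaluates K[0] and raises IndexError on the empty list; Pre_ excludes exactly that.
def Pre_get_slowest_key (K : List (String × Int)) : Prop := K ≠ []
instance (K : List (String × Int)) : Decidable (Pre_get_slowest_key K) := by unfold Pre_get_slowest_key; infer_instance
def pvWitness_get_slowest_key : (List (String × Int)) := [("a", 5), ("b", 9), ("c", 10)]

def Spec_get_slowest_key (K : List (String × Int)) (out : String) : Prop := out = get_slowest_key_alt K
instance (K : List (String × Int)) (out : String) : Decidable (Spec_get_slowest_key K out) := by unfold Spec_get_slowest_key; infer_instance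

-- ===== CLAIM (what is proved, stated in full; the proofs are below) =====
def Claim_equal_get_slowest_key : Prop := ∀ (K : List (String × Int)), Dom_get_slowest_key K → Pre_get_slowest_key K → Spec_get_slowest_key K (get_slowest_key K)

-- ===== LEMMAS AND PROOFS =====

-- pyRange 1 (N+1) written as a shifted List.range, to index the durations table
lemma pyRange_one_shift (N : Nat) :
    PySem.List.pyRange 1 ((N : Int) + 1) = List.map (fun k : Nat => (k : Int) + 1) (List.range N) := by
  induction N with
  | zero => simp [PySem.List.pyRange]
  | succ n ih =>
    rw [show (((n + 1 : Nat) : Int) + 1) = ((n : Int) + 1) + 1 by push_cast; ring,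
      PySem.List.pyRange_one_succ_right (by omega), ih, List.range_succ]
    simp

-- both foldls over the same index list stay in lock-step: A's state is (nm b, key b) where b is
-- B's current first-argmax candidate
lemma fold_agree (nm : Int → String) (key dv : Int → Int) :
    ∀ (L : List Int) (b : Int), (∀ i ∈ L, dv i = key i) →
    ∃ b', PySem.List.max? (b :: L) key = some b'
      ∧ L.foldl (fun st i => if dv i > st.2 then (nm i, dv i) else st) (nm b, key b) = (nm b', key b') := by
  intro L
  induction L with
  | nil => exact fun b _ => ⟨b, rfl, rfl⟩
  | cons i L ih =>
    intro b h
    have hi : dv i = key i := h i (List.mem_cons_self ..)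
    have hrest : ∀ j ∈ L, dv j = key j := fun j hj => h j (List.mem_cons_of_mem _ hj)
    have hstep : PySem.List.max? (b :: i :: L) key
        = PySem.List.max? ((if key b < key i then i else b) :: L) key := by
      by_cases hlt : key b < key i <;> simp [PySem.List.max?, hlt]
    by_cases hlt : key b < key i
    · have hgt : dv i > (nm b, key b).2 := by simpa [hi] using hlt
      rw [hstep, if_pos hlt, List.foldl_cons, if_pos hgt, hi]
      exact ih i hrest
    · have hgt : ¬ dv i > (nm b, key b).2 := by simpa [hi] using hlt
      rw [hstep, if_neg hlt, List.foldl_cons, if_neg hgt]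
      exact ih b hrest

-- proof-local abbreviations for the two ports' ingredients
def nmF (K : List (String × Int)) (i : Int) : String := (PySem.List.pyGetD K i ("", 0)).1
def dvF (K : List (String × Int)) (i : Int) : Int :=
  (PySem.List.pyGetD K i ("", 0)).2 - (PySem.List.pyGetD K (i - 1) ("", 0)).2
def durF (K : List (String × Int)) : List Int :=
  (PySem.List.pyGetD K 0 ("", 0)).2 :: (PySem.List.pyRange 1 (K.length : Int)).map (dvF K)
def keyF (K : List (String × Int)) (i : Int) : Int := PySem.List.pyGetD (durF K) i 0

lemma dv_eq_key (K : List (String × Int)) :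
    ∀ i ∈ PySem.List.pyRange 1 (K.length : Int), dvF K i = keyF K i := by
  cases K with
  | nil =>
    intro i hi
    rw [PySem.List.mem_pyRange_one] at hi
    simp at hi
    omega
  | cons h rest =>
    have hc : (((h :: rest).length : Nat) : Int) = (rest.length : Int) + 1 := by
      push_cast [List.length_cons]; ring
    rw [hc, pyRange_one_shift]
    intro i hi
    obtain ⟨k, hk, rfl⟩ := List.mem_map.mp hi
    have hkN : k < rest.length := List.mem_range.mp hk
    show dvF (h :: rest) ((k : Int) + 1) = PySem.List.pyGetD (durF (h :: rest)) ((k : Int) + 1) 0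
    rw [show ((k : Int) + 1) = ((k + 1 : Nat) : Int) by push_cast; ring,
      PySem.List.pyGetD_natCast]
    simp only [durF, hc, pyRange_one_shift, List.map_map]
    simp [List.getD, hkN, Function.comp, dvF]

lemma key_zero (K : List (String × Int)) :
    keyF K 0 = (PySem.List.pyGetD K 0 ("", 0)).2 := by
  simp [keyF, durF, PySem.List.pyGetD_ofNat']

-- ===== VERDICT (by name: the statement is the Claim_ definition above) =====
theorem get_slowest_key_spec : Claim_equal_get_slowest_key := by
  intro K _ hpre
  obtain ⟨⟨s, t⟩, rest, rfl⟩ : ∃ p rest, K = p :: rest := by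
    cases K with
    | nil => exact absurd rfl hpre
    | cons p rest => exact ⟨p, rest, rfl⟩
  unfold Spec_get_slowest_key get_slowest_key get_slowest_key_alt
  show (((PySem.List.pyRange 1 ((((s, t) :: rest).length : Nat) : Int)).foldl
      (fun st i => if dvF ((s, t) :: rest) i > st.2
        then (nmF ((s, t) :: rest) i, dvF ((s, t) :: rest) i) else st)
      ((PySem.List.pyGetD ((s, t) :: rest) 0 ("", 0)).1,
       (PySem.List.pyGetD ((s, t) :: rest) 0 ("", 0)).2)).1)
    = match PySem.List.max? (PySem.List.pyRange 0 ((((s, t) :: rest).length : Nat) : Int))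
        (fun i => keyF ((s, t) :: rest) i) with
      | some idx => (PySem.List.pyGetD ((s, t) :: rest) idx ("", 0)).1
      | none => ""
  rw [← key_zero ((s, t) :: rest),
    show (PySem.List.pyGetD ((s, t) :: rest) 0 ("", 0)).1 = nmF ((s, t) :: rest) 0 from rfl]
  obtain ⟨b', hB, hA⟩ := fold_agree (nmF ((s, t) :: rest)) (keyF ((s, t) :: rest))
    (dvF ((s, t) :: rest)) (PySem.List.pyRange 1 ((((s, t) :: rest).length : Nat) : Int)) 0
    (dv_eq_key ((s, t) :: rest))
  have hcons : PySem.List.pyRange 0 ((((s, t) :: rest).length : Nat) : Int)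
      = 0 :: PySem.List.pyRange 1 ((((s, t) :: rest).length : Nat) : Int) := by
    have := PySem.List.pyRange_one_cons (a := 0)
      (b := ((((s, t) :: rest).length : Nat) : Int)) (by simp)
    simpa using this
  rw [hA, hcons, hB]
  rfl
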